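-- pv_equiv track=rewrite | github.com/bsuman/jobrelatred | numphotos.py | count_photos
-- ===== SOURCE A (Python) =====
-- def count_photos(road):
--     # parse from left to right
--     # for each right moving car check num cameras
--     # for each right mobing cars number of photos taken will = num of cameras in it's path
--     roadlist = list(road)
--     numphotos = 0
--     numright = 0
--     numleft = 0
--     right = '>'
--     left = '<'
--     camera = '.'
--     l = len(roadlist)
--     j = l - 1
--     for i in range(l):
--         if roadlist[i] == right:
--             numright = numright + 1
--         elif roadlist[i] == camera:
--             numphotos = numphotos + numright
--
--         if roadlist[j] == left:
--             numleft = numleft + 1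
--         elif roadlist[j] == camera:
--             numphotos = numphotos + numleft
--
--         j = j - 1
--
--     return numphotos
-- ===== SOURCE B (Python) =====
-- def count_photos(road):
--     # One forward pass: a '.' photographs every '>' already seen;
--     # a '<' is photographed by every '.' already seen.
--     total = 0
--     rights = 0
--     cameras = 0
--     for ch in road:
--         if ch == '>':
--             rights += 1
--         elif ch == '.':
--             total += rights
--             cameras += 1
--         elif ch == '<':
--             total += cameras
--     return total
-- ===== Notes on version B (the rewrite author's own statement) =====
-- stated objective: simpler
-- what changed: Replaces A's simultaneous forward-and-backward two-pointer scan (which pairs each camera with the left-moving cars behind a second index) by a single forward pass that also maintains a running camera counter and charges each left-moving car with the cameras already passed.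
import Mathlib
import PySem

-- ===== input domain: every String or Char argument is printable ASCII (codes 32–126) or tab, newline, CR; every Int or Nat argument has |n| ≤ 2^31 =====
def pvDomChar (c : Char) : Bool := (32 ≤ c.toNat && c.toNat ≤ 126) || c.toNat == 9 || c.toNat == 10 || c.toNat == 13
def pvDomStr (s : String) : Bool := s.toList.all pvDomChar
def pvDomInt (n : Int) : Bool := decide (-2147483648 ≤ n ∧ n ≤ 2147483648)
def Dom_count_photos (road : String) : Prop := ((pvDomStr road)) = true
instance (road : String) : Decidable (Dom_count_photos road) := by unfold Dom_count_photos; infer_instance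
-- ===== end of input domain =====

-- B replaces A's simultaneous forward+backward two-pointer scan by a single forward
-- pass that also keeps a camera counter and charges each '<' with the cameras seen (objective: simpler).

-- ===== PORT A =====
def count_photos (road : String) : Int :=
  let roadlist := road.toList
  let numphotos : Int := 0
  let numright : Int := 0
  let numleft : Int := 0
  let right := '>'
  let left := '<'
  let camera := '.'
  let l := PySem.List.len roadlist
  let j := l - 1
  let st := (PySem.List.pyRange 0 l 1).foldl
    (fun (st : Int × Int × Int × Int) i =>
      match st with
      | (numphotos, numright, numleft, j) =>
        let ci := PySem.List.pyGetD roadlist i ' '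
        let fw : Int × Int :=
          if ci = right then (numphotos, numright + 1)
          else if ci = camera then (numphotos + numright, numright)
          else (numphotos, numright)
        let cj := PySem.List.pyGetD roadlist j ' '
        let bw : Int × Int :=
          if cj = left then (fw.1, numleft + 1)
          else if cj = camera then (fw.1 + numleft, numleft)
          else (fw.1, numleft)
        (bw.1, fw.2, bw.2, j - 1))
    (numphotos, numright, numleft, j)
  st.1

-- ===== PORT B =====
def count_photos_alt (road : String) : Int :=
  let st := road.toList.foldl
    (fun (st : Int × Int × Int) ch =>
      match st with
      | (total, rights, cameras) =>
        if ch = '>' then (total, rights + 1, cameras)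
        else if ch = '.' then (total + rights, rights, cameras + 1)
        else if ch = '<' then (total + cameras, rights, cameras)
        else (total, rights, cameras))
    (0, 0, 0)
  st.1

-- ===== PRECONDITION & SPEC =====
def Spec_count_photos (road : String) (out : Int) : Prop := out = count_photos_alt road
instance (road : String) (out : Int) : Decidable (Spec_count_photos road out) := by unfold Spec_count_photos; infer_instance

-- ===== CLAIM (what is proved, stated in full; the proofs are below) =====
def Claim_equal_count_photos : Prop := ∀ (road : String), Dom_count_photos road → Spec_count_photos road (count_photos road)

-- ===== LEMMAS AND PROOFS =====

-- counts, as Int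
def pvCntD (l : List Char) : Int := (l.count '.' : Int)
def pvCntL (l : List Char) : Int := (l.count '<' : Int)
def pvCntG (l : List Char) : Int := (l.count '>' : Int)

-- '>'-before-'.' pairs
def pvSf : List Char → Int
  | [] => 0
  | a :: l => (if a = '>' then pvCntD l else 0) + pvSf l
-- '.'-before-'<' pairs
def pvT : List Char → Int
  | [] => 0
  | a :: l => (if a = '.' then pvCntL l else 0) + pvT l
-- '<'-before-'.' pairs
def pvSg : List Char → Int
  | [] => 0
  | b :: l => (if b = '<' then pvCntD l else 0) + pvSg l

def pvS (l : List Char) : Int := pvSf l + pvT l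

-- forward step on a char (photos, rights)
def pvStepF (st : Int × Int) (c : Char) : Int × Int :=
  if c = '>' then (st.1, st.2 + 1) else if c = '.' then (st.1 + st.2, st.2) else st
-- backward step on a char (photos, lefts)
def pvStepG (st : Int × Int) (c : Char) : Int × Int :=
  if c = '<' then (st.1, st.2 + 1) else if c = '.' then (st.1 + st.2, st.2) else st
-- B's step
def pvStepAlt (st : Int × Int × Int) (ch : Char) : Int × Int × Int :=
  match st with
  | (total, rights, cameras) =>
    if ch = '>' then (total, rights + 1, cameras)
    else if ch = '.' then (total + rights, rights, cameras + 1)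
    else if ch = '<' then (total + cameras, rights, cameras)
    else (total, rights, cameras)
-- A's step (identical to the lambda in the port)
def pvStepA (cs : List Char) (st : Int × Int × Int × Int) (i : Int) : Int × Int × Int × Int :=
  match st with
  | (numphotos, numright, numleft, j) =>
    let ci := PySem.List.pyGetD cs i ' '
    let fw : Int × Int :=
      if ci = '>' then (numphotos, numright + 1)
      else if ci = '.' then (numphotos + numright, numright)
      else (numphotos, numright)
    let cj := PySem.List.pyGetD cs j ' '
    let bw : Int × Int :=
      if cj = '<' then (fw.1, numleft + 1)
      else if cj = '.' then (fw.1 + numleft, numleft)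
      else (fw.1, numleft)
    (bw.1, fw.2, bw.2, j - 1)
-- forward-by-index step
def pvStepFi (cs : List Char) (st : Int × Int) (i : Int) : Int × Int :=
  pvStepF st (PySem.List.pyGetD cs i ' ')
-- backward step with carried index j (ignores the range value)
def pvStepB (cs : List Char) (st : Int × Int × Int) (_i : Int) : Int × Int × Int :=
  match st with
  | (p, nl, j) =>
    let cj := PySem.List.pyGetD cs j ' '
    if cj = '<' then (p, nl + 1, j - 1)
    else if cj = '.' then (p + nl, nl, j - 1)
    else (p, nl, j - 1)

lemma count_photos_eq (road : String) :
    count_photos road =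
      ((PySem.List.pyRange 0 (PySem.List.len road.toList) 1).foldl
        (pvStepA road.toList) (0, 0, 0, PySem.List.len road.toList - 1)).1 := rfl

lemma count_photos_alt_eq (road : String) :
    count_photos_alt road = (road.toList.foldl pvStepAlt (0, 0, 0)).1 := rfl

-- affine characterisation of the forward fold over chars
lemma foldF_char (l : List Char) : ∀ p r : Int,
    l.foldl pvStepF (p, r) = (p + r * pvCntD l + pvSf l, r + pvCntG l) := by
  induction l with
  | nil => intro p r; simp [pvCntD, pvCntG, pvSf]
  | cons a l ih =>
    intro p r
    simp only [List.foldl_cons]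
    by_cases h1 : a = '>'
    · subst h1
      rw [show pvStepF (p, r) '>' = (p, r + 1) from rfl, ih, Prod.mk.injEq]
      refine ⟨?_, ?_⟩ <;> try simp [pvCntD, pvCntG, pvSf, List.count_cons] <;> try push_cast <;> try ring
    · by_cases h2 : a = '.'
      · subst h2
        rw [show pvStepF (p, r) '.' = (p + r, r) from rfl, ih, Prod.mk.injEq]
        refine ⟨?_, ?_⟩ <;> try simp [pvCntD, pvCntG, pvSf, List.count_cons] <;> try push_cast <;> try ring
      · rw [show pvStepF (p, r) a = (p, r) by simp [pvStepF, h1, h2], ih, Prod.mk.injEq]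
        refine ⟨?_, ?_⟩ <;> try simp [pvCntD, pvCntG, pvSf, List.count_cons, h1, h2] <;> try push_cast <;> try ring

-- affine characterisation of the backward fold over chars
lemma foldG_char (l : List Char) : ∀ p nl : Int,
    l.foldl pvStepG (p, nl) = (p + nl * pvCntD l + pvSg l, nl + pvCntL l) := by
  induction l with
  | nil => intro p nl; simp [pvCntD, pvCntL, pvSg]
  | cons a l ih =>
    intro p nl
    simp only [List.foldl_cons]
    by_cases h1 : a = '<'
    · subst h1
      rw [show pvStepG (p, nl) '<' = (p, nl + 1) from rfl, ih, Prod.mk.injEq]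
      refine ⟨?_, ?_⟩ <;> try simp [pvCntD, pvCntL, pvSg, List.count_cons] <;> try push_cast <;> try ring
    · by_cases h2 : a = '.'
      · subst h2
        rw [show pvStepG (p, nl) '.' = (p + nl, nl) from rfl, ih, Prod.mk.injEq]
        refine ⟨?_, ?_⟩ <;> try simp [pvCntD, pvCntL, pvSg, List.count_cons] <;> try push_cast <;> try ring
      · rw [show pvStepG (p, nl) a = (p, nl) by simp [pvStepG, h1, h2], ih, Prod.mk.injEq]
        refine ⟨?_, ?_⟩ <;> try simp [pvCntD, pvCntL, pvSg, List.count_cons, h1, h2] <;> try push_cast <;> try ring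

-- B's fold
lemma foldAlt_char (l : List Char) : ∀ t r c : Int,
    (l.foldl pvStepAlt (t, r, c)).1 = t + r * pvCntD l + c * pvCntL l + pvS l := by
  induction l with
  | nil => intro t r c; simp [pvCntD, pvCntL, pvS, pvSf, pvT]
  | cons a l ih =>
    intro t r c
    simp only [List.foldl_cons]
    by_cases h1 : a = '>'
    · subst h1
      rw [show pvStepAlt (t, r, c) '>' = (t, r + 1, c) from rfl, ih]
      simp [pvCntD, pvCntL, pvS, pvSf, pvT, List.count_cons]
      try push_cast
      try ring
    · by_cases h2 : a = '.'
      · subst h2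
        rw [show pvStepAlt (t, r, c) '.' = (t + r, r, c + 1) from rfl, ih]
        simp [pvCntD, pvCntL, pvS, pvSf, pvT, List.count_cons]
        try push_cast
        try ring
      · by_cases h3 : a = '<'
        · subst h3
          rw [show pvStepAlt (t, r, c) '<' = (t + c, r, c) from rfl, ih]
          simp [pvCntD, pvCntL, pvS, pvSf, pvT, List.count_cons]
          try push_cast
          try ring
        · rw [show pvStepAlt (t, r, c) a = (t, r, c) by simp [pvStepAlt, h1, h2, h3], ih]
          simp [pvCntD, pvCntL, pvS, pvSf, pvT, List.count_cons, h1, h2, h3]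

-- affinity of the index folds in their photo component
lemma foldFi_shift (cs : List Char) (ks : List Int) : ∀ p r : Int,
    ks.foldl (pvStepFi cs) (p, r) =
      (p + (ks.foldl (pvStepFi cs) (0, r)).1, (ks.foldl (pvStepFi cs) (0, r)).2) := by
  induction ks with
  | nil => intro p r; simp
  | cons k ks ih =>
    intro p r
    simp only [List.foldl_cons]
    have hx := ih (pvStepFi cs (0, r) k).1 (pvStepFi cs (0, r) k).2
    rw [show ((pvStepFi cs (0, r) k).1, (pvStepFi cs (0, r) k).2) = pvStepFi cs (0, r) k from rfl] at hx
    have hsplit : pvStepFi cs (p, r) k = ((pvStepFi cs (0, r) k).1 + p, (pvStepFi cs (0, r) k).2) := by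
      simp [pvStepFi, pvStepF]; split_ifs <;> simp <;> ring
    rw [hsplit, ih, hx]
    simp only [Prod.mk.injEq]
    try push_cast
    try refine ⟨?_, ?_⟩
    all_goals try refine ⟨?_, ?_⟩
    all_goals first | trivial | ring | omega

lemma foldB_shift (cs : List Char) (ks : List Int) : ∀ p nl j : Int,
    ks.foldl (pvStepB cs) (p, nl, j) =
      (p + (ks.foldl (pvStepB cs) (0, nl, j)).1, (ks.foldl (pvStepB cs) (0, nl, j)).2) := by
  induction ks with
  | nil => intro p nl j; simp
  | cons k ks ih =>
    intro p nl j
    simp only [List.foldl_cons]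
    have hx := ih (pvStepB cs (0, nl, j) k).1 (pvStepB cs (0, nl, j) k).2.1 (pvStepB cs (0, nl, j) k).2.2
    rw [show ((pvStepB cs (0, nl, j) k).1, (pvStepB cs (0, nl, j) k).2.1, (pvStepB cs (0, nl, j) k).2.2) = pvStepB cs (0, nl, j) k from rfl] at hx
    have hsplit : pvStepB cs (p, nl, j) k = ((pvStepB cs (0, nl, j) k).1 + p, (pvStepB cs (0, nl, j) k).2) := by
      simp [pvStepB]; split_ifs <;> simp <;> ring
    rw [hsplit, ih, hx]
    simp only [Prod.mk.injEq]
    try push_cast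
    try refine ⟨?_, ?_⟩
    all_goals try refine ⟨?_, ?_⟩
    all_goals first | trivial | ring | omega

-- A's interleaved fold splits into the two independent folds
lemma foldA_split (cs : List Char) (ks : List Int) : ∀ p r nl j : Int,
    ks.foldl (pvStepA cs) (p, r, nl, j) =
      (p + (ks.foldl (pvStepFi cs) (0, r)).1 + (ks.foldl (pvStepB cs) (0, nl, j)).1,
       (ks.foldl (pvStepFi cs) (0, r)).2,
       (ks.foldl (pvStepB cs) (0, nl, j)).2) := by
  induction ks with
  | nil => intro p r nl j; simp
  | cons k ks ih =>
    intro p r nl j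
    simp only [List.foldl_cons]
    have hstep : pvStepA cs (p, r, nl, j) k =
        (p + (pvStepFi cs (0, r) k).1 + (pvStepB cs (0, nl, j) k).1,
         (pvStepFi cs (0, r) k).2,
         (pvStepB cs (0, nl, j) k).2) := by
      simp [pvStepA, pvStepFi, pvStepF, pvStepB]
      split_ifs <;> simp <;> ring
    have hF := foldFi_shift cs ks (pvStepFi cs (0, r) k).1 (pvStepFi cs (0, r) k).2
    rw [show ((pvStepFi cs (0, r) k).1, (pvStepFi cs (0, r) k).2) = pvStepFi cs (0, r) k from rfl] at hF
    have hB := foldB_shift cs ks (pvStepB cs (0, nl, j) k).1 (pvStepB cs (0, nl, j) k).2.1 (pvStepB cs (0, nl, j) k).2.2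
    rw [show ((pvStepB cs (0, nl, j) k).1, (pvStepB cs (0, nl, j) k).2.1, (pvStepB cs (0, nl, j) k).2.2) = pvStepB cs (0, nl, j) k from rfl] at hB
    rw [hstep, ih, hF, hB]
    simp only [Prod.mk.injEq]
    try push_cast
    try refine ⟨?_, ?_⟩
    all_goals try refine ⟨?_, ?_⟩
    all_goals first | trivial | ring | omega

-- the backward fold reads exactly the chars of ds when they line up along j, j-1, …
lemma foldB_chars (cs : List Char) : ∀ (ds : List Char) (ks : List Int) (p nl j : Int),
    ks.length = ds.length →
    (∀ k : Nat, k < ds.length → PySem.List.pyGetD cs (j - k) ' ' = ds.getD k ' ') →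
    ks.foldl (pvStepB cs) (p, nl, j) =
      ((ds.foldl pvStepG (p, nl)).1, (ds.foldl pvStepG (p, nl)).2, j - ds.length) := by
  intro ds
  induction ds with
  | nil => intro ks p nl j hlen _; simp at hlen; simp [hlen]
  | cons d ds ih =>
    intro ks p nl j hlen hread
    match ks with
    | [] => simp at hlen
    | k :: ks =>
      simp only [List.foldl_cons]
      have h0 : PySem.List.pyGetD cs j ' ' = d := by
        have := hread 0 (by simp)
        simpa using this
      have hrest : ∀ k : Nat, k < ds.length → PySem.List.pyGetD cs ((j - 1) - k) ' ' = ds.getD k ' ' := by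
        intro k hk
        have := hread (k + 1) (by simp; omega)
        simp at this
        rw [show (j - 1 - (k : Int)) = j - ((k : Int) + 1) by ring]
        exact this
      have hlen' : ks.length = ds.length := by simpa using hlen
      have hstep : pvStepB cs (p, nl, j) k = (pvStepG (p, nl) d |>.1, pvStepG (p, nl) d |>.2, j - 1) := by
        simp [pvStepB, pvStepG, h0]
        split_ifs <;> simp
      rw [hstep]
      rw [show ((pvStepG (p, nl) d).1, (pvStepG (p, nl) d).2, j - 1) = ((pvStepG (p, nl) d).1, ((pvStepG (p, nl) d).2, j - 1)) from rfl]
      rw [ih ks (pvStepG (p, nl) d).1 (pvStepG (p, nl) d).2 (j - 1) hlen' hrest]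
      rw [show ((pvStepG (p, nl) d).1, (pvStepG (p, nl) d).2) = pvStepG (p, nl) d from rfl]
      simp only [List.length_cons, Prod.mk.injEq]
      try push_cast
      try refine ⟨?_, ?_⟩
      all_goals try refine ⟨?_, ?_⟩
      all_goals first | trivial | ring | omega

-- appending a char to the '<'-before-'.' sum
lemma pvSg_append (l : List Char) (a : Char) :
    pvSg (l ++ [a]) = pvSg l + (if a = '.' then pvCntL l else 0) := by
  induction l with
  | nil => simp [pvSg, pvCntL, pvCntD]
  | cons b l ih =>
    simp only [List.cons_append, pvSg, ih, pvCntD, pvCntL, List.count_append, List.count_cons]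
    by_cases h1 : b = '<' <;> by_cases h2 : a = '.' <;>
      simp [h1, h2, List.count_singleton] <;> push_cast <;> ring_nf <;>
      simp_all [pvCntD] <;> push_cast <;> ring

-- the backward pairs over the reversed road are the '.'-before-'<' pairs
lemma pvSg_reverse (l : List Char) : pvSg l.reverse = pvT l := by
  induction l with
  | nil => simp [pvSg, pvT]
  | cons a l ih =>
    simp only [List.reverse_cons, pvSg_append, ih, pvT, pvCntL]
    rw [List.count_reverse]
    ring

-- alignment of the indices l-1, l-2, … with the reversed char list
lemma read_reverse (cs : List Char) (k : Nat) (hk : k < cs.length) :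
    PySem.List.pyGetD cs ((cs.length : Int) - 1 - k) ' ' = cs.reverse.getD k ' ' := by
  have hcast : ((cs.length : Int) - 1 - k) = ((cs.length - 1 - k : Nat) : Int) := by omega
  rw [hcast, PySem.List.pyGetD_natCast]
  have hlt : cs.length - 1 - k < cs.length := by omega
  have hrk : k < cs.reverse.length := by simpa using hk
  rw [List.getD_eq_getElem _ _ hlt, List.getD_eq_getElem _ _ hrk, List.getElem_reverse]

-- ===== VERDICT (by name: the statement is the Claim_ definition above) =====
theorem count_photos_spec : Claim_equal_count_photos := by
  intro road _
  unfold Spec_count_photos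
  rw [count_photos_eq, count_photos_alt_eq]
  set cs := road.toList with hcs
  have hlenrange : (PySem.List.pyRange 0 (PySem.List.len cs) 1).length = cs.length := by
    simp [PySem.List.length_pyRange_one, PySem.List.len]
  rw [foldA_split]
  have hF : (PySem.List.pyRange 0 (PySem.List.len cs) 1).foldl (pvStepFi cs) ((0 : Int), (0 : Int)) =
      cs.foldl pvStepF (0, 0) := by
    have := PySem.List.foldl_pyRange_zero_pyGetD cs ' ' pvStepF ((0 : Int), (0 : Int))
    simpa [pvStepFi] using this
  have hB := foldB_chars cs cs.reverse (PySem.List.pyRange 0 (PySem.List.len cs) 1)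
      0 0 ((PySem.List.len cs) - 1)
      (by simpa using hlenrange)
      (by
        intro k hk
        have hk' : k < cs.length := by simpa using hk
        have := read_reverse cs k hk'
        simpa [PySem.List.len] using this)
  rw [hF, hB]
  simp only [foldF_char, foldG_char, foldAlt_char]
  rw [pvSg_reverse]
  simp [pvS]
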